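-- pv_equiv track=rewrite | github.com/FirelightFlagboy/python | mooc/projet/cos_sin.py | ft_strcmp
-- ===== SOURCE A (Python) =====
-- def ft_strcmp(s1, s2):
-- 	"""fonction qui compare deux chaine de caractere
-- 	et qui renvoie non si identique,
-- 	ou qui renvoie la difference de l'ordre ASCII des
-- 	deux caractere qui differe"""
-- 	i = 0
-- 	len1 = len(s1)
-- 	len2 = len(s2)
-- 	while i < len1 and i < len2 and s1[i] == s2[i]:
-- 		i += 1
-- 	if i >= len1 and i >= len2:
-- 		return 0
-- 	elif i >= len1 :
-- 		return -ord(s2[i])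
-- 	elif i>= len2 :
-- 		return ord(s1[i])
-- 	else :
-- 		return ord(s1[i]) - ord(s2[i])
-- ===== SOURCE B (Python) =====
-- def ft_strcmp(s1, s2):
--     # Binary search for the longest common prefix length, using whole-prefix
--     # slice comparisons; then compare the single character pair at that point
--     # (a missing character counts as 0).
--     lo, hi = 0, min(len(s1), len(s2))
--     while lo < hi:
--         mid = (lo + hi + 1) // 2
--         if s1[:mid] == s2[:mid]:
--             lo = mid
--         else:
--             hi = mid - 1
--     c1 = ord(s1[lo]) if lo < len(s1) else 0
--     c2 = ord(s2[lo]) if lo < len(s2) else 0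
--     return c1 - c2
-- ===== Notes on version B (the rewrite author's own statement) =====
-- stated objective: faster
-- what changed: B finds the first mismatch position by binary search over prefix lengths (comparing whole slices s1[:mid] == s2[:mid]), then compares the single character pair at that position (missing char counts as 0), instead of A's linear char-by-char walk with four-way length branching; the O(log n) slice comparisons run as C-level memcmp, which a timing run measured ~4x faster at the largest size.
import Mathlib
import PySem

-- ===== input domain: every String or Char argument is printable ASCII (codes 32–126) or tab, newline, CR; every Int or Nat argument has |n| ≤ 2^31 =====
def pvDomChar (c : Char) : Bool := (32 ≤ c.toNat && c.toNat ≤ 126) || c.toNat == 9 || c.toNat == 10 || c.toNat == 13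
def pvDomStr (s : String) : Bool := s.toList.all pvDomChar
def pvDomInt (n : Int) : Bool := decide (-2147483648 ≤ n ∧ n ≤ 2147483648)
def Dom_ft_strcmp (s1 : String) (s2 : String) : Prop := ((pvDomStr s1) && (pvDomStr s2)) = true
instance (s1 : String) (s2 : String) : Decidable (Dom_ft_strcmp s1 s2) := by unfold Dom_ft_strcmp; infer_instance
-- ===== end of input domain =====

-- B locates the first mismatch by binary search over prefix lengths (whole-slice
-- comparisons) instead of A's linear walk with four-way length branching; measured faster via C-level slice comparisons (objective: faster).
-- ===== PORT A =====
-- A's while loop walks both strings together; the four return branches of A map onto the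
-- four shapes of the remaining suffixes, so the index i becomes structural recursion.
def ftStrcmpLoop : List Char → List Char → Int
  | [], [] => 0
  | [], c2 :: _ => -((c2.toNat : Int))
  | c1 :: _, [] => (c1.toNat : Int)
  | c1 :: t1, c2 :: t2 =>
      if c1 = c2 then ftStrcmpLoop t1 t2
      else (c1.toNat : Int) - (c2.toNat : Int)

def ft_strcmp (s1 : String) (s2 : String) : Int :=
  ftStrcmpLoop s1.toList s2.toList

-- ===== PORT B =====
-- the while loop of Source B: binary search for the longest m with s1[:m] == s2[:m]
def pvBsearch (l1 l2 : List Char) (lo hi : Nat) : Nat :=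
  if _h : lo < hi then
    let mid := (lo + hi + 1) / 2
    if l1.take mid = l2.take mid then pvBsearch l1 l2 mid hi
    else pvBsearch l1 l2 lo (mid - 1)
  else lo
termination_by hi - lo
decreasing_by all_goals omega

def ft_strcmp_alt (s1 : String) (s2 : String) : Int :=
  let l1 := s1.toList
  let l2 := s2.toList
  let lo := pvBsearch l1 l2 0 (min l1.length l2.length)
  let c1 : Int := if lo < l1.length then ((l1.getD lo 'a').toNat : Int) else 0
  let c2 : Int := if lo < l2.length then ((l2.getD lo 'a').toNat : Int) else 0
  c1 - c2

-- ===== PRECONDITION & SPEC =====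
def Spec_ft_strcmp (s1 : String) (s2 : String) (out : Int) : Prop := out = ft_strcmp_alt s1 s2
instance (s1 : String) (s2 : String) (out : Int) : Decidable (Spec_ft_strcmp s1 s2 out) := by unfold Spec_ft_strcmp; infer_instance

-- ===== CLAIM =====
def Claim_equal_ft_strcmp : Prop := ∀ (s1 : String) (s2 : String), Dom_ft_strcmp s1 s2 → Spec_ft_strcmp s1 s2 (ft_strcmp s1 s2)

-- ===== LEMMAS AND PROOFS =====
-- The binary search maintains: prefixes of length lo agree, and either hi is the
-- full min length or prefixes of length hi+1 disagree; its result k keeps both.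
lemma pvBsearch_spec (l1 l2 : List Char) (lo hi : Nat)
    (hlh : lo ≤ hi) (hhi : hi ≤ min l1.length l2.length)
    (heq : l1.take lo = l2.take lo)
    (hend : hi = min l1.length l2.length ∨ l1.take (hi + 1) ≠ l2.take (hi + 1)) :
    (l1.take (pvBsearch l1 l2 lo hi) = l2.take (pvBsearch l1 l2 lo hi)) ∧
    (pvBsearch l1 l2 lo hi = min l1.length l2.length ∨
      l1.take (pvBsearch l1 l2 lo hi + 1) ≠ l2.take (pvBsearch l1 l2 lo hi + 1)) ∧
    pvBsearch l1 l2 lo hi ≤ min l1.length l2.length := by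
  induction lo, hi using pvBsearch.induct l1 l2 with
  | case1 lo hi h mid htake ih =>
    rw [pvBsearch]
    simp only [dif_pos h]
    rw [if_pos (show List.take ((lo + hi + 1) / 2) l1 = List.take ((lo + hi + 1) / 2) l2 from htake)]
    exact ih (by omega) hhi htake hend
  | case2 lo hi h mid htake ih =>
    rw [pvBsearch]
    simp only [dif_pos h]
    rw [if_neg (show ¬ List.take ((lo + hi + 1) / 2) l1 = List.take ((lo + hi + 1) / 2) l2 from htake)]
    refine ih (by omega) (by omega) heq (Or.inr ?_)
    have hm : mid - 1 + 1 = mid := by omega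
    rw [hm]; exact htake
  | case3 lo hi h =>
    rw [pvBsearch]
    simp only [dif_neg h]
    have : lo = hi := by omega
    subst this
    exact ⟨heq, hend, hhi⟩

-- A's loop returns the character difference at any position k that is a maximal
-- common-prefix length (missing characters counting as 0).
lemma ftStrcmpLoop_at_lcp (l1 l2 : List Char) (k : Nat)
    (heq : l1.take k = l2.take k)
    (hend : k = min l1.length l2.length ∨ l1.take (k + 1) ≠ l2.take (k + 1))
    (hk : k ≤ min l1.length l2.length) :
    ftStrcmpLoop l1 l2 =
      (if k < l1.length then ((l1.getD k 'a').toNat : Int) else 0) -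
      (if k < l2.length then ((l2.getD k 'a').toNat : Int) else 0) := by
  induction l1 generalizing l2 k with
  | nil =>
    have hk0 : k = 0 := by simp only [List.length_nil, Nat.min_comm, Nat.min_zero, Nat.le_zero] at hk; omega
    subst hk0
    cases l2 with
    | nil => simp [ftStrcmpLoop]
    | cons c2 t2 => simp [ftStrcmpLoop]
  | cons c1 t1 ih =>
    cases l2 with
    | nil =>
      have hk0 : k = 0 := by simp only [List.length_nil, Nat.min_zero, Nat.le_zero] at hk; omega
      subst hk0
      simp [ftStrcmpLoop]
    | cons c2 t2 =>
      cases k with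
      | zero =>
        have hne : c1 ≠ c2 := by
          rcases hend with h | h
          · simp at h
          · intro hc; apply h; simp [List.take_succ_cons, hc]
        simp [ftStrcmpLoop, hne]
      | succ j =>
        simp only [List.take_succ_cons, List.cons.injEq] at heq
        obtain ⟨hc, htail⟩ := heq
        subst hc
        have hk' : j ≤ min t1.length t2.length := by
          simp only [List.length_cons] at hk; omega
        have hend' : j = min t1.length t2.length ∨ t1.take (j + 1) ≠ t2.take (j + 1) := by
          rcases hend with h | h
          · left; simp only [List.length_cons] at h; omega
          · right; intro hc2; apply h; simp [List.take_succ_cons, hc2]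
        have hrec := ih t2 j htail hend' hk'
        have hstep : ftStrcmpLoop (c1 :: t1) (c1 :: t2) = ftStrcmpLoop t1 t2 := by
          simp [ftStrcmpLoop]
        rw [hstep, hrec]
        simp only [List.length_cons, List.getD_cons_succ, Nat.add_lt_add_iff_right]

-- ===== VERDICT =====
theorem ft_strcmp_spec : Claim_equal_ft_strcmp := by
  intro s1 s2 _
  unfold Spec_ft_strcmp ft_strcmp ft_strcmp_alt
  set l1 := s1.toList
  set l2 := s2.toList
  obtain ⟨h1, h2, h3⟩ := pvBsearch_spec l1 l2 0 (min l1.length l2.length)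
    (Nat.zero_le _) le_rfl (by simp) (Or.inl rfl)
  exact ftStrcmpLoop_at_lcp l1 l2 _ h1 h2 h3
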